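-- pv_equiv track=rewrite | github.com/minu0508/Algorithm | Python/Programmers/Level_0/피자 나눠 먹기 (2).py | solution
-- ===== SOURCE A (Python) =====
-- def solution(n):
--     answer = 0
--     Num = 1
--     while(True):
--         Save = Num * 6
--         Num += 1
--         if (Save % n == 0):
--             answer = Save // 6
--             break
--     return answer
-- ===== SOURCE B (Python) =====
-- from math import gcd
--
-- def solution(n):
--     return abs(n) // gcd(6, n)
-- ===== Notes on version B (the rewrite author's own statement) =====
-- stated objective: faster
-- what changed: Replaces A's linear trial loop over multiples of 6 with the closed form abs(n) // gcd(6, n) computed by Euclid's algorithm.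
import Mathlib
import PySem

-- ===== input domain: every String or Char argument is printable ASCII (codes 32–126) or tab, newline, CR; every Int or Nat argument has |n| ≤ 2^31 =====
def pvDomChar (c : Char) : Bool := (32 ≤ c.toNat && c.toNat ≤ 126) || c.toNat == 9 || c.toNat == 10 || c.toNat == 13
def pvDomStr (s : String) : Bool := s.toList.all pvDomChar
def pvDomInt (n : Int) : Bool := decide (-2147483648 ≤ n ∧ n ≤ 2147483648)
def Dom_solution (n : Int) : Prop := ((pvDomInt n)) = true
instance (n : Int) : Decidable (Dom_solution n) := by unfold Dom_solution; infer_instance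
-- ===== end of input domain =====

-- B replaces A's linear search over multiples of 6 by the closed form |n| // gcd(6, n) (Euclid): asymptotically faster.


-- ===== PORT A =====
-- A's `while True` loop, made total with a fuel of n.natAbs + 1 (enough for every n ≠ 0,
-- since 6 * |n| is divisible by n); fuel 0 (unreachable inside Pre_) returns the initial answer 0.
def solutionLoop (n : Int) : Nat → Int → Int
  | 0, _ => 0
  | fuel + 1, num =>
    if PySem.Int.mod (num * 6) n = 0 then PySem.Int.floordiv (num * 6) 6
    else solutionLoop n fuel (num + 1)

def solution (n : Int) : Int := solutionLoop n (n.natAbs + 1) 1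

-- ===== PORT B =====
def solution_alt (n : Int) : Int :=
  PySem.Int.floordiv (Int.natAbs n : Int) (Int.gcd 6 n : Int)

-- ===== PRECONDITION & SPEC =====
-- Pre_ excludes exactly n = 0, on which Python A raises ZeroDivisionError.
def Pre_solution (n : Int) : Prop := n ≠ 0
instance (n : Int) : Decidable (Pre_solution n) := by unfold Pre_solution; infer_instance
def pvWitness_solution : Int := (10)

def Spec_solution (n : Int) (out : Int) : Prop := out = solution_alt n
instance (n : Int) (out : Int) : Decidable (Spec_solution n out) := by unfold Spec_solution; infer_instance

-- ===== CLAIM (what is proved, stated in full; the proofs are below) =====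
def Claim_equal_solution : Prop := ∀ (n : Int), Dom_solution n → Pre_solution n → Spec_solution n (solution n)

-- ===== LEMMAS AND PROOFS =====

-- Nat characterisation: for a ≠ 0, a ∣ 6*j ↔ (a / gcd 6 a) ∣ j.
theorem nat_char (a j : Nat) (_ha : a ≠ 0) :
    a ∣ 6 * j ↔ a / Nat.gcd 6 a ∣ j := by
  have hg : Nat.gcd 6 a ≠ 0 := by positivity
  have hga : Nat.gcd 6 a ∣ a := Nat.gcd_dvd_right 6 a
  have hg6 : Nat.gcd 6 a ∣ 6 := Nat.gcd_dvd_left 6 a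
  have hco : Nat.Coprime (6 / Nat.gcd 6 a) (a / Nat.gcd 6 a) :=
    Nat.coprime_div_gcd_div_gcd (Nat.pos_of_ne_zero hg)
  constructor
  · intro h
    have h6 : 6 = Nat.gcd 6 a * (6 / Nat.gcd 6 a) := (Nat.mul_div_cancel' hg6).symm
    have ha' : a = Nat.gcd 6 a * (a / Nat.gcd 6 a) := (Nat.mul_div_cancel' hga).symm
    have h2 : Nat.gcd 6 a * (a / Nat.gcd 6 a) ∣ Nat.gcd 6 a * ((6 / Nat.gcd 6 a) * j) := by
      rw [← ha', ← mul_assoc, ← h6]; exact h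
    have h3 : a / Nat.gcd 6 a ∣ (6 / Nat.gcd 6 a) * j :=
      (mul_dvd_mul_iff_left hg).mp h2
    exact (Nat.Coprime.dvd_of_dvd_mul_left (Nat.Coprime.symm hco) h3)
  · intro h
    have key : a ∣ 6 * (a / Nat.gcd 6 a) := by
      have heq : 6 * (a / Nat.gcd 6 a) = (6 / Nat.gcd 6 a) * a := by
        calc 6 * (a / Nat.gcd 6 a) = 6 * a / Nat.gcd 6 a := (Nat.mul_div_assoc 6 hga).symm
          _ = a * 6 / Nat.gcd 6 a := by rw [Nat.mul_comm 6 a]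
          _ = a * (6 / Nat.gcd 6 a) := Nat.mul_div_assoc a hg6
          _ = (6 / Nat.gcd 6 a) * a := Nat.mul_comm _ _
      rw [heq]; exact dvd_mul_left a _
    exact key.trans (mul_dvd_mul_left 6 h)

-- Int characterisation, for all integers j.
theorem int_char (n j : Int) (hn : n ≠ 0) :
    n ∣ 6 * j ↔ (((n.natAbs / Nat.gcd 6 n.natAbs : Nat)) : Int) ∣ j := by
  have ha : n.natAbs ≠ 0 := Int.natAbs_ne_zero.mpr hn
  constructor
  · intro h
    have h2 : n.natAbs ∣ (6 * j).natAbs := Int.natAbs_dvd_natAbs.mpr h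
    rw [Int.natAbs_mul] at h2
    have h3 := (nat_char n.natAbs j.natAbs ha).mp (by simpa using h2)
    exact Int.natAbs_dvd_natAbs.mp (by simp only [Int.natAbs_natCast]; exact h3)
  · intro h
    have h2 : n.natAbs / Nat.gcd 6 n.natAbs ∣ j.natAbs := by
      have h2' := Int.natAbs_dvd_natAbs.mpr h
      simp only [Int.natAbs_natCast] at h2'
      exact h2'
    have h3 : n.natAbs ∣ 6 * j.natAbs := (nat_char n.natAbs j.natAbs ha).mpr h2
    exact Int.natAbs_dvd_natAbs.mp (by simpa [Int.natAbs_mul] using h3)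

-- The loop returns m, the least positive k with n ∣ 6k, given enough fuel.
theorem loop_eq (n : Int) (_hn : n ≠ 0) (m : Int)
    (hm : 0 < m)
    (hchar : ∀ j : Int, n ∣ 6 * j ↔ m ∣ j) :
    ∀ (fuel : Nat) (num : Int), 0 < num → num ≤ m → m - num < fuel →
      solutionLoop n fuel num = m := by
  intro fuel
  induction fuel with
  | zero => intro num h1 h2 h3; omega
  | succ f ih =>
    intro num h1 h2 h3
    rw [solutionLoop]
    by_cases hd : PySem.Int.mod (num * 6) n = 0
    · rw [if_pos hd]
      have hdvd : n ∣ 6 * num := by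
        have := (PySem.Int.mod_eq_zero_iff_dvd (num * 6) n).mp hd
        rwa [mul_comm] at this
      have hmd : m ∣ num := (hchar num).mp hdvd
      have : m ≤ num := Int.le_of_dvd h1 hmd
      have hnum : num = m := le_antisymm h2 this
      subst hnum
      rw [PySem.Int.floordiv_eq_ediv_of_pos (by norm_num : (0:Int) < 6)]
      omega
    · rw [if_neg hd]
      have hne : num ≠ m := by
        intro he; subst he
        exact hd ((PySem.Int.mod_eq_zero_iff_dvd (num * 6) n).mpr
          (by rw [mul_comm]; exact (hchar num).mpr dvd_rfl))
      exact ih (num + 1) (by omega) (by omega) (by omega)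

-- ===== VERDICT (by name: the statement is the Claim_ definition above) =====
theorem solution_spec : Claim_equal_solution := by
  intro n _ hn
  unfold Spec_solution solution solution_alt
  have ha : n.natAbs ≠ 0 := Int.natAbs_ne_zero.mpr hn
  set g : Nat := Nat.gcd 6 n.natAbs with hg
  have hgpos : 0 < g := Nat.gcd_pos_of_pos_left _ (by norm_num)
  have hga : g ∣ n.natAbs := Nat.gcd_dvd_right 6 n.natAbs
  set mN : Nat := n.natAbs / g with hmN
  have hmpos : 0 < mN := Nat.div_pos (Nat.le_of_dvd (Nat.pos_of_ne_zero ha) hga) hgpos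
  have hmle : mN ≤ n.natAbs := Nat.div_le_self _ _
  have hchar : ∀ j : Int, n ∣ 6 * j ↔ (mN : Int) ∣ j := fun j => int_char n j hn
  have hloop := loop_eq n hn (mN : Int) (by exact_mod_cast hmpos) hchar
    (n.natAbs + 1) 1 (by norm_num) (by exact_mod_cast hmpos) (by
      have hmle' : (mN : Int) ≤ (n.natAbs : Int) := by exact_mod_cast hmle
      omega)
  rw [hloop]
  have hgcd : Int.gcd 6 n = g := by
    simp [Int.gcd, hg]
  rw [hgcd, hmN]
  exact_mod_cast (PySem.Int.floordiv_natCast n.natAbs g).symm
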